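-- pv_equiv track=rewrite | github.com/oskros/Project_euler | helper.py | ordered_set_partitions
-- ===== SOURCE A (Python) =====
-- def ordered_set_partitions(lst):
--     if not lst:
--         return []
--
--     out = []
--     for idx in range(len(lst)-1):
--         out.append([lst[:idx+1]] + [lst[idx+1:]])
--         for part in ordered_set_partitions(lst[idx + 1:]):
--             out.append([lst[:idx + 1]] + part)
--
--     return out
-- ===== SOURCE B (Python) =====
-- def ordered_set_partitions(lst):
--     # Bottom-up table over suffixes: F[0] holds ALL compositions (including the
--     # single-block one) of the current suffix; built right-to-left, no recursion.
--     if not lst: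
--         return []
--     F = []
--     suffix = []
--     for x in reversed(lst):
--         suffix = [x] + suffix
--         cur = [[suffix]]
--         for j, Fk in enumerate(F):
--             block = suffix[:j + 1]
--             for c in Fk:
--                 cur.append([block] + c)
--         F = [cur] + F
--     return F[0][1:]
-- ===== Notes on version B (the rewrite author's own statement) =====
-- stated objective: alternative
-- what changed: Replaces A's top-down recursion that re-solves every suffix exponentially often by a single right-to-left pass that fills a table of all compositions of each suffix once (dynamic programming), reading shorter-suffix results from the table instead of recursing.
import Mathlib
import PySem

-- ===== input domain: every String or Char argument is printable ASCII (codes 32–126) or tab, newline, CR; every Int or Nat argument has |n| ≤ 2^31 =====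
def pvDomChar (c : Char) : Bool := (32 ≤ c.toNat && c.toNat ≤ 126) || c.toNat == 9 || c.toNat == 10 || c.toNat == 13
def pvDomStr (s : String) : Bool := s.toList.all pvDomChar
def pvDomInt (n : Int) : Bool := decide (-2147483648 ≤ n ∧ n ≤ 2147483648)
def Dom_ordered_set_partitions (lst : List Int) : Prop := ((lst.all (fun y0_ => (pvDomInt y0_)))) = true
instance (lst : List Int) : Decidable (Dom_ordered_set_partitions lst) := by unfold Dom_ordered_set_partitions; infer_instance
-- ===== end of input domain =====

-- B replaces A's re-slicing recursion by one right-to-left pass filling a table of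
-- suffix compositions, each suffix solved once (objective: alternative).

-- ===== PORT A =====
-- literal transliteration of A: range(len(lst)-1) is List.range (lst.length - 1)
-- (attach only carries the membership fact used for termination); the slices
-- lst[:idx+1] / lst[idx+1:] with nonnegative in-range bounds are take/drop (exact).
def ordered_set_partitions (lst : List Int) : List (List (List Int)) :=
  if lst.isEmpty then []
  else
    (List.range (lst.length - 1)).attach.foldl
      (fun out p =>
        out ++ ([lst.take (p.1 + 1), lst.drop (p.1 + 1)] ::
          (ordered_set_partitions (lst.drop (p.1 + 1))).map
            (fun part => lst.take (p.1 + 1) :: part)))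
      []
termination_by lst.length
decreasing_by
  have h := List.mem_range.mp p.2
  simp only [List.length_drop]
  omega

-- ===== PORT B =====
-- one loop iteration of Source B: suffix = [x] + suffix; cur = [[suffix]];
-- for j, Fk in enumerate(F): block = suffix[:j+1]; for c in Fk: cur.append([block]+c);
-- F = [cur] + F
def altStep (st : List Int × List (List (List (List Int)))) (x : Int) :
    List Int × List (List (List (List Int))) :=
  let suffix := x :: st.1
  let cur := (PySem.List.enumerate st.2 0).foldl
    (fun cur p =>
      p.2.foldl (fun cur c =>
        cur ++ [PySem.List.slice suffix none (some (p.1 + 1)) :: c]) cur)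
    [[suffix]]
  (suffix, cur :: st.2)

-- F[0] is in range in the non-empty branch, so the total pyGetD is exact; F[0][1:] is slice 1 none
def ordered_set_partitions_alt (lst : List Int) : List (List (List Int)) :=
  if lst.isEmpty then []
  else
    let st := lst.reverse.foldl altStep ([], [])
    PySem.List.slice (PySem.List.pyGetD st.2 0 []) (some 1) none

-- ===== PRECONDITION & SPEC =====
def Spec_ordered_set_partitions (lst : List Int) (out : List (List (List Int))) : Prop := out = ordered_set_partitions_alt lst
instance (lst : List Int) (out : List (List (List Int))) : Decidable (Spec_ordered_set_partitions lst out) := by unfold Spec_ordered_set_partitions; infer_instance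

-- ===== CLAIM (what is proved, stated in full; the proofs are below) =====
def Claim_equal_ordered_set_partitions : Prop := ∀ (lst : List Int), Dom_ordered_set_partitions lst → Spec_ordered_set_partitions lst (ordered_set_partitions lst)

-- ===== LEMMAS AND PROOFS =====

-- the table entry B maintains for a (nonempty) suffix s
def tabOf (s : List Int) : List (List (List Int)) := [s] :: ordered_set_partitions s

-- the nonempty suffixes of r, longest first
def suffs : List Int → List (List Int)
  | [] => []
  | x :: r => (x :: r) :: suffs r

theorem suffs_length (r : List Int) : (suffs r).length = r.length := by
  induction r with
  | nil => rfl
  | cons x r ih => simp [suffs, ih]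

theorem suffs_getElem (r : List Int) (j : Nat) (h : j < (suffs r).length) :
    (suffs r)[j] = r.drop j := by
  induction r generalizing j with
  | nil => simp [suffs] at h
  | cons x r ih =>
    cases j with
    | zero => simp [suffs]
    | succ j => simpa [suffs] using ih j (by simpa [suffs] using h)

theorem A_cons (x : Int) (r : List Int) :
    ordered_set_partitions (x :: r) =
      (List.range r.length).flatMap (fun j =>
        [(x :: r).take (j + 1), (x :: r).drop (j + 1)] ::
          (ordered_set_partitions ((x :: r).drop (j + 1))).map
            (fun part => (x :: r).take (j + 1) :: part)) := by
  conv_lhs => rw [ordered_set_partitions]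
  simp only [List.isEmpty_cons, Bool.false_eq_true, if_false, List.length_cons]
  rw [List.foldl_attach (f := fun out j =>
    out ++ ([(x :: r).take (j + 1), (x :: r).drop (j + 1)] ::
      (ordered_set_partitions ((x :: r).drop (j + 1))).map
        (fun part => (x :: r).take (j + 1) :: part)))]
  rw [PySem.List.foldl_append_eq_flatMap]
  simp

theorem cur_eq (x : Int) (r : List Int) :
    (PySem.List.enumerate ((suffs r).map tabOf) 0).foldl
      (fun cur p =>
        p.2.foldl (fun cur c =>
          cur ++ [PySem.List.slice (x :: r) none (some (p.1 + 1)) :: c]) cur)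
      [[x :: r]]
    = tabOf (x :: r) := by
  rw [PySem.List.foldl_congr_mem _ _
    (fun cur (p : Int × List (List (List Int))) =>
      cur ++ p.2.map (fun c => PySem.List.slice (x :: r) none (some (p.1 + 1)) :: c)) _
    (fun acc p _ => PySem.List.foldl_append_singleton_eq_map _ _ _)]
  rw [PySem.List.foldl_append_eq_flatMap]
  rw [PySem.List.enumerate_eq_map_pyRange (d := ([] : List (List (List Int))))]
  rw [List.flatMap_map]
  have hlen : PySem.List.len ((suffs r).map tabOf) = (r.length : Int) := by
    simp [PySem.List.len_eq, suffs_length]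
  rw [hlen, PySem.List.pyRange_one]
  rw [List.flatMap_map]
  have hcongr : ∀ j ∈ List.range (((r.length : Int) - 0).toNat),
      (PySem.List.pyGetD ((suffs r).map tabOf) ((0 : Int) + j) []).map
        (fun c => PySem.List.slice (x :: r) none (some ((0 : Int) + j + 1)) :: c)
      = [(x :: r).take (j + 1), (x :: r).drop (j + 1)] ::
          (ordered_set_partitions ((x :: r).drop (j + 1))).map
            (fun part => (x :: r).take (j + 1) :: part) := by
    intro j hj
    have hjr : j < r.length := by
      have := List.mem_range.mp hj; omega
    have hjs : j < (suffs r).length := by simpa [suffs_length] using hjr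
    have hget : PySem.List.pyGetD ((suffs r).map tabOf) ((0 : Int) + j) [] = tabOf (r.drop j) := by
      rw [zero_add, PySem.List.pyGetD_natCast,
        List.getD_eq_getElem _ _ (by simpa using hjs),
        List.getElem_map, suffs_getElem r j hjs]
    have hslice : PySem.List.slice (x :: r) none (some ((0 : Int) + j + 1))
        = (x :: r).take (j + 1) := by
      rw [zero_add, show ((j : Int) + 1) = ((j + 1 : Nat) : Int) by push_cast; ring,
        PySem.List.slice_to_natCast]
    simp only [hget, hslice, tabOf, List.map_cons, List.drop_succ_cons]
  rw [List.flatMap_congr hcongr]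
  have : ((r.length : Int) - 0).toNat = r.length := by omega
  rw [this, ← A_cons x r, tabOf]
  rfl

-- the loop invariant of B: after consuming lst (right to left), the state is
-- (lst, the table tabOf over all nonempty suffixes of lst, longest first)
theorem alt_inv (lst : List Int) :
    lst.reverse.foldl altStep ([], []) = (lst, (suffs lst).map tabOf) := by
  induction lst with
  | nil => simp [suffs]
  | cons x r ih =>
    rw [List.reverse_cons, List.foldl_append, ih]
    show altStep (r, (suffs r).map tabOf) x = _
    unfold altStep
    simp only [suffs, List.map_cons]
    exact congrArg _ (congrArg (· :: _) (cur_eq x r))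

theorem ordered_set_partitions_spec : Claim_equal_ordered_set_partitions := by
  intro lst _
  unfold Spec_ordered_set_partitions ordered_set_partitions_alt
  cases lst with
  | nil => simp [ordered_set_partitions]
  | cons x r =>
    simp only [List.isEmpty_cons, Bool.false_eq_true, if_false, alt_inv]
    rw [show ((suffs (x :: r)).map tabOf) = tabOf (x :: r) :: (suffs r).map tabOf by
      simp [suffs]]
    rw [PySem.List.pyGetD_zero_cons, PySem.List.slice_from_one, tabOf]
    rfl
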